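-- pv_equiv track=rewrite | github.com/butterbuster4/AHS | crossover.py | _get_matrix_size
-- ===== SOURCE A (Python) =====
-- def _get_matrix_size(matrix):
--     top, bottom = None, None
--     left, right = None, None
--
--     rows = len(matrix)
--     cols = len(matrix[0])
--
--     for i in range(rows):
--         for j in range(cols):
--             if matrix[i][j] is not None:
--                 if top is None or i < top:
--                     top = i
--                 if bottom is None or i > bottom:
--                     bottom = i
--                 if left is None or j < left:
--                     left = j
--                 if right is None or j > right:
--                     right = j
--
--     if top is None:  # all None
--         return 0, 0
--
--     width = right - left + 1
--     height = bottom - top + 1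
--     return width, height
-- ===== SOURCE B (Python) =====
-- def _get_matrix_size(matrix):
--     rows = len(matrix)
--     cols = len(matrix[0])
--     occupied = [(i, j) for i in range(rows) for j in range(cols)
--                 if matrix[i][j] is not None]
--     if not occupied:
--         return 0, 0
--     row_ids = [i for i, j in occupied]
--     col_ids = [j for i, j in occupied]
--     width = max(col_ids) - min(col_ids) + 1
--     height = max(row_ids) - min(row_ids) + 1
--     return width, height
-- ===== Notes on version B (the rewrite author's own statement) =====
-- stated objective: simpler
-- what changed: Materialises the list of occupied coordinates once, then computes the bounding box with separate min/max aggregations, instead of threading four Option-valued running extremes through a nested loop with eight inline branches.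
import Mathlib
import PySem

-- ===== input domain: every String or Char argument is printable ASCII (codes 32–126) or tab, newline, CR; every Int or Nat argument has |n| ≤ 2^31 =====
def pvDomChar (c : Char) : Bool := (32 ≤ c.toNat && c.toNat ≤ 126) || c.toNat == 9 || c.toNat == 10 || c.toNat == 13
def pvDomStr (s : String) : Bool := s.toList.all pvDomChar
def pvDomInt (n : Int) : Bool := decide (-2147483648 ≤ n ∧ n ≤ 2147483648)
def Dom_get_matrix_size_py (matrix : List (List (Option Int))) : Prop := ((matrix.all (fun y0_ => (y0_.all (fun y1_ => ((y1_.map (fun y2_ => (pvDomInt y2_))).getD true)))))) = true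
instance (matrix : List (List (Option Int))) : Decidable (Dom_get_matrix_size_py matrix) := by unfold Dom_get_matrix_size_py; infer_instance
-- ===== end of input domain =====

-- B replaces A's four Option-valued running extremes with a materialised list of occupied
-- coordinates aggregated by min/max passes (objective: simpler; same asymptotic cost).

-- ===== PORT A =====
-- "if top is None or i < top: top = i"
def pvUpdMin (o : Option Int) (v : Int) : Option Int :=
  match o with
  | none => some v
  | some t => if v < t then some v else some t

-- "if bottom is None or i > bottom: bottom = i"
def pvUpdMax (o : Option Int) (v : Int) : Option Int :=
  match o with
  | none => some v
  | some t => if v > t then some v else some t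

def get_matrix_size_py (matrix : List (List (Option Int))) : Int × Int :=
  let rows := matrix.length
  let cols := (matrix.headD []).length
  let st := (List.range rows).foldl (fun st i =>
      (List.range cols).foldl (fun st j =>
        match (matrix.getD i []).getD j none with   -- matrix[i][j]; in range inside Pre_
        | some _ =>
            (pvUpdMin st.1 (i : Int), pvUpdMax st.2.1 (i : Int),
             pvUpdMin st.2.2.1 (j : Int), pvUpdMax st.2.2.2 (j : Int))
        | none => st) st)
    ((none, none, none, none) : Option Int × Option Int × Option Int × Option Int)
  match st.1 with
  | none => (0, 0)   -- all None
  | some top => (st.2.2.2.getD 0 - st.2.2.1.getD 0 + 1, st.2.1.getD 0 - top + 1)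

-- ===== PORT B =====
def get_matrix_size_py_alt (matrix : List (List (Option Int))) : Int × Int :=
  let rows := matrix.length
  let cols := (matrix.headD []).length
  let occupied := (List.range rows).flatMap (fun i =>
      ((List.range cols).filter (fun j => ((matrix.getD i []).getD j none).isSome)).map
        (fun (j : Nat) => ((i : Int), (j : Int))))
  if occupied.isEmpty then (0, 0)
  else
    let row_ids := occupied.map (·.1)
    let col_ids := occupied.map (·.2)
    (col_ids.max?.getD 0 - col_ids.min?.getD 0 + 1,
     row_ids.max?.getD 0 - row_ids.min?.getD 0 + 1)

-- ===== PRECONDITION & SPEC =====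
-- Pre_ excludes exactly the inputs where the Python raises IndexError: the empty matrix
-- (matrix[0]) and ragged matrices with a row shorter than row 0 (matrix[i][j]).
def Pre_get_matrix_size_py (matrix : List (List (Option Int))) : Prop :=
  matrix ≠ [] ∧ ∀ row ∈ matrix, (matrix.headD []).length ≤ row.length
instance (matrix : List (List (Option Int))) : Decidable (Pre_get_matrix_size_py matrix) := by
  unfold Pre_get_matrix_size_py; infer_instance
def pvWitness_get_matrix_size_py : List (List (Option Int)) := [[some 1, none], [none, some 2]]
def Spec_get_matrix_size_py (matrix : List (List (Option Int))) (out : Int × Int) : Prop := out = get_matrix_size_py_alt matrix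
instance (matrix : List (List (Option Int))) (out : Int × Int) : Decidable (Spec_get_matrix_size_py matrix out) := by unfold Spec_get_matrix_size_py; infer_instance

-- ===== CLAIM (what is proved, stated in full; the proofs are below) =====
def Claim_equal_get_matrix_size_py : Prop := ∀ (matrix : List (List (Option Int))), Dom_get_matrix_size_py matrix → Pre_get_matrix_size_py matrix → Spec_get_matrix_size_py matrix (get_matrix_size_py matrix)

-- ===== LEMMAS AND PROOFS =====

-- the occupied coordinates, with Nat coordinates (proof-side helper)
def pvOcc (matrix : List (List (Option Int))) : List (Nat × Nat) :=
  (List.range matrix.length).flatMap (fun i =>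
    ((List.range (matrix.headD []).length).filter
        (fun j => ((matrix.getD i []).getD j none).isSome)).map (fun j => (i, j)))

def pvStep (st : Option Int × Option Int × Option Int × Option Int) (p : Nat × Nat) :
    Option Int × Option Int × Option Int × Option Int :=
  (pvUpdMin st.1 (p.1 : Int), pvUpdMax st.2.1 (p.1 : Int),
   pvUpdMin st.2.2.1 (p.2 : Int), pvUpdMax st.2.2.2 (p.2 : Int))

-- A's conditional inner loop over one row = unconditional fold over the filtered column list
theorem pv_inner (matrix : List (List (Option Int))) (i : Nat) (L : List Nat)
    (st : Option Int × Option Int × Option Int × Option Int) :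
    L.foldl (fun st j =>
        match (matrix.getD i []).getD j none with
        | some _ =>
            (pvUpdMin st.1 (i : Int), pvUpdMax st.2.1 (i : Int),
             pvUpdMin st.2.2.1 (j : Int), pvUpdMax st.2.2.2 (j : Int))
        | none => st) st
      = ((L.filter (fun j => ((matrix.getD i []).getD j none).isSome)).map
          (fun j => (i, j))).foldl pvStep st := by
  induction L generalizing st with
  | nil => rfl
  | cons x L ih =>
      simp only [List.foldl_cons, List.filter_cons]
      cases h : (matrix.getD i []).getD x none with
      | none =>
          simp only [Option.isSome_none, Bool.false_eq_true, if_false]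
          exact ih st
      | some v =>
          simp only [Option.isSome_some, if_true, List.map_cons, List.foldl_cons, pvStep]
          exact ih _

-- A's whole nested fold = fold of pvStep over pvOcc
theorem pv_fold_occ (matrix : List (List (Option Int)))
    (st : Option Int × Option Int × Option Int × Option Int) :
    (List.range matrix.length).foldl (fun st i =>
      (List.range (matrix.headD []).length).foldl (fun st j =>
        match (matrix.getD i []).getD j none with
        | some _ =>
            (pvUpdMin st.1 (i : Int), pvUpdMax st.2.1 (i : Int),
             pvUpdMin st.2.2.1 (j : Int), pvUpdMax st.2.2.2 (j : Int))
        | none => st) st) st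
      = (pvOcc matrix).foldl pvStep st := by
  rw [pvOcc, List.foldl_flatMap]
  exact List.foldl_ext _ _ _
    (fun st i _ => pv_inner matrix i (List.range (matrix.headD []).length) st)

-- componentwise decomposition of the fold
theorem pv_components (L : List (Nat × Nat))
    (a b c d : Option Int) :
    L.foldl pvStep (a, b, c, d)
      = ((L.map (fun p => (p.1 : Int))).foldl pvUpdMin a,
         (L.map (fun p => (p.1 : Int))).foldl pvUpdMax b,
         (L.map (fun p => (p.2 : Int))).foldl pvUpdMin c,
         (L.map (fun p => (p.2 : Int))).foldl pvUpdMax d) := by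
  induction L generalizing a b c d with
  | nil => rfl
  | cons x L ih => simp [pvStep, ih]

theorem pv_foldMin_some (L : List Int) (a : Int) :
    L.foldl pvUpdMin (some a) = some (L.foldl min a) := by
  induction L generalizing a with
  | nil => rfl
  | cons x L ih =>
      simp only [List.foldl_cons, pvUpdMin]
      split_ifs with h
      · rw [ih]; have hm : min a x = x := by omega
        rw [hm]
      · rw [ih]; have hm : min a x = a := by omega
        rw [hm]

theorem pv_foldMax_some (L : List Int) (a : Int) :
    L.foldl pvUpdMax (some a) = some (L.foldl max a) := by
  induction L generalizing a with
  | nil => rfl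
  | cons x L ih =>
      simp only [List.foldl_cons, pvUpdMax]
      split_ifs with h
      · rw [ih]; have hm : max a x = x := by omega
        rw [hm]
      · rw [ih]; have hm : max a x = a := by omega
        rw [hm]

theorem pv_foldMin (L : List Int) : L.foldl pvUpdMin none = L.min? := by
  cases L with
  | nil => rfl
  | cons x L => rw [List.foldl_cons, List.min?_cons']; exact pv_foldMin_some L x

theorem pv_foldMax (L : List Int) : L.foldl pvUpdMax none = L.max? := by
  cases L with
  | nil => rfl
  | cons x L => rw [List.foldl_cons, List.max?_cons']; exact pv_foldMax_some L x

-- ===== VERDICT (by name: the statement is the Claim_ definition above) =====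
theorem get_matrix_size_py_spec : Claim_equal_get_matrix_size_py := by
  intro matrix _ _
  unfold Spec_get_matrix_size_py get_matrix_size_py get_matrix_size_py_alt
  dsimp only
  rw [pv_fold_occ, pv_components, pv_foldMin, pv_foldMax, pv_foldMin, pv_foldMax]
  have hocc : (List.range matrix.length).flatMap (fun i =>
      ((List.range (matrix.headD []).length).filter
        (fun j => ((matrix.getD i []).getD j none).isSome)).map
        (fun (j : Nat) => ((i : Int), (j : Int))))
      = (pvOcc matrix).map (fun p => ((p.1 : Int), (p.2 : Int))) := by
    rw [pvOcc, List.map_flatMap]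
    congr 1
    funext i
    rw [List.map_map]
    rfl
  rw [hocc]
  cases pvOcc matrix with
  | nil => simp
  | cons p L =>
      simp only [List.map_cons, List.map_map, Function.comp_def, List.isEmpty_cons,
        Bool.false_eq_true, if_false]
      rw [List.min?_cons']
      simp
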